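-- pv_equiv track=rewrite | github.com/alan-turing-institute/advent-of-code-2024 | day-22/python_crangelsmith/day22.py | n_operations
-- ===== SOURCE A (Python) =====
-- def operations(secret_number):
--     secret_number = (secret_number * 64) ^ secret_number
--     secret_number = secret_number % 16777216
--
--     secret_number = int(secret_number / 32) ^ secret_number
--     secret_number = secret_number % 16777216
--
--     secret_number = (secret_number * 2048) ^ secret_number
--     secret_number = secret_number % 16777216
--
--     return secret_number
--
-- def n_operations(secret_number, n):
--
--     differences = []
--     last_dig = []
--     last_digit = secret_number % 10
--     for i in range(n):
--         last_dig.append(secret_number % 10)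
--         secret_number = operations(secret_number)
--         differences.append(secret_number% 10 - last_digit)
--
--         last_digit = secret_number % 10
--
--     last_dig.append(secret_number % 10)
--
--     return secret_number, differences, last_dig
-- ===== SOURCE B (Python) =====
-- def step(s):
--     s = (s ^ (s << 6)) % 16777216
--     s = (s ^ (s >> 5)) % 16777216
--     s = (s ^ (s << 11)) % 16777216
--     return s
--
-- def n_operations(secret_number, n):
--     # divide and conquer: split the n steps into two halves, solve each
--     # recursively, and stitch the results together at the midpoint.
--     if n <= 0:
--         return secret_number, [], [secret_number % 10]
--     if n == 1:
--         t = step(secret_number)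
--         return t, [t % 10 - secret_number % 10], [secret_number % 10, t % 10]
--     m = n // 2
--     mid, d1, g1 = n_operations(secret_number, m)
--     fin, d2, g2 = n_operations(mid, n - m)
--     # g1's last digit equals g2's first (both are mid % 10): drop the duplicate
--     return fin, d1 + d2, g1[:-1] + g2
-- ===== Notes on version B (the rewrite author's own statement) =====
-- stated objective: alternative
-- what changed: B replaces A's single linear loop that threads a last_digit accumulator with a divide-and-conquer recursion: it splits the n PRNG steps at the midpoint, solves the two halves recursively (base cases n<=0 and n==1), and stitches the results by concatenating the difference lists and joining the digit trails with the duplicate midpoint digit dropped.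
import Mathlib
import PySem

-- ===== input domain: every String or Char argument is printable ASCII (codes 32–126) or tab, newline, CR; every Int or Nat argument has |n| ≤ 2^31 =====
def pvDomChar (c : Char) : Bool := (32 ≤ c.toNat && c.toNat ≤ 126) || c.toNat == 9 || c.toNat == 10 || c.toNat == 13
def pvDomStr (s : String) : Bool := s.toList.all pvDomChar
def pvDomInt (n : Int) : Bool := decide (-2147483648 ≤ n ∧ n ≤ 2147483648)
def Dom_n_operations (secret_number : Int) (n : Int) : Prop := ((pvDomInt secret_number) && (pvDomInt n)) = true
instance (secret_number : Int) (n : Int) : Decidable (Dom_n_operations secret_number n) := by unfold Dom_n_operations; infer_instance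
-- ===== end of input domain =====

-- B replaces A's single linear loop with a divide-and-conquer recursion that splits
-- the n PRNG steps at the midpoint and stitches the half results; objective:
-- alternative decomposition, similar cost.

-- ===== PORT A =====
-- int(x/32): x here is nonnegative and < 2^53, so Python's float division + int()
-- is exactly integer truncating division, ported as PySem.Int.truncdiv.
def operations (secret_number : Int) : Int :=
  let s1 := PySem.Int.mod (PySem.Int.bxor (secret_number * 64) secret_number) 16777216
  let s2 := PySem.Int.mod (PySem.Int.bxor (PySem.Int.truncdiv s1 32) s1) 16777216
  PySem.Int.mod (PySem.Int.bxor (s2 * 2048) s2) 16777216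

-- the for-loop of A, state = (secret_number, differences, last_dig, last_digit)
def nopsLoop : List Int → Int × List Int × List Int × Int → Int × List Int × List Int × Int
  | [], st => st
  | _ :: rest, (s, diffs, last_dig, last_digit) =>
    let ld := last_dig ++ [PySem.Int.mod s 10]
    let s' := operations s
    let df := diffs ++ [PySem.Int.mod s' 10 - last_digit]
    nopsLoop rest (s', df, ld, PySem.Int.mod s' 10)

def n_operations (secret_number : Int) (n : Int) : Int × List Int × List Int :=
  let st := nopsLoop (PySem.List.pyRange 0 n 1)
    (secret_number, [], [], PySem.Int.mod secret_number 10)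
  (st.1, st.2.1, st.2.2.1 ++ [PySem.Int.mod st.1 10])

-- ===== PORT B =====
def stepB (s : Int) : Int :=
  let a := PySem.Int.mod (PySem.Int.bxor s (s <<< (6 : Nat))) 16777216
  let b := PySem.Int.mod (PySem.Int.bxor a (a >>> (5 : Nat))) 16777216
  PySem.Int.mod (PySem.Int.bxor b (b <<< (11 : Nat))) 16777216

-- divide and conquer on the step count n; g1[:-1] is List.dropLast (exact for any list).
-- The fuel argument only makes the same recursion structural (fuel = n.toNat suffices,
-- since both recursive calls strictly shrink n); it changes no computed value.
def altGo : Nat → Int → Int → Int × List Int × List Int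
  | 0, s, _ => (s, [], [PySem.Int.mod s 10])
  | fuel + 1, s, n =>
    if n ≤ 0 then (s, [], [PySem.Int.mod s 10])
    else if n = 1 then
      let t := stepB s
      (t, [PySem.Int.mod t 10 - PySem.Int.mod s 10],
        [PySem.Int.mod s 10, PySem.Int.mod t 10])
    else
      let m := PySem.Int.floordiv n 2
      let r1 := altGo fuel s m
      let r2 := altGo fuel r1.1 (n - m)
      (r2.1, r1.2.1 ++ r2.2.1, r1.2.2.dropLast ++ r2.2.2)

def n_operations_alt (secret_number : Int) (n : Int) : Int × List Int × List Int :=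
  altGo n.toNat secret_number n

-- ===== PRECONDITION & SPEC =====
def Spec_n_operations (secret_number : Int) (n : Int) (out : Int × List Int × List Int) : Prop := out = n_operations_alt secret_number n
instance (secret_number : Int) (n : Int) (out : Int × List Int × List Int) : Decidable (Spec_n_operations secret_number n out) := by unfold Spec_n_operations; infer_instance

-- ===== CLAIM (what is proved, stated in full; the proofs are below) =====
def Claim_equal_n_operations : Prop := ∀ (secret_number : Int) (n : Int), Dom_n_operations secret_number n → Spec_n_operations secret_number n (n_operations secret_number n)

-- ===== LEMMAS AND PROOFS =====

-- pure characterisations of the iteration (proof-side only)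
def finS : Int → Nat → Int
  | s, 0 => s
  | s, k + 1 => finS (operations s) k

def digsS : Int → Nat → List Int
  | s, 0 => [PySem.Int.mod s 10]
  | s, k + 1 => PySem.Int.mod s 10 :: digsS (operations s) k

def dlistS : Int → Nat → List Int
  | _, 0 => []
  | s, k + 1 => (PySem.Int.mod (operations s) 10 - PySem.Int.mod s 10) :: dlistS (operations s) k

lemma bxor_shl6 (s : Int) : PySem.Int.bxor s (s <<< (6 : Nat)) = PySem.Int.bxor (s * 64) s := by
  rw [PySem.Int.bxor_comm]; norm_num [Int.shiftLeft_eq]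

lemma bxor_shl11 (b : Int) : PySem.Int.bxor b (b <<< (11 : Nat)) = PySem.Int.bxor (b * 2048) b := by
  rw [PySem.Int.bxor_comm]; norm_num [Int.shiftLeft_eq]

lemma bxor_shr5 (a : Int) (h : 0 ≤ a) :
    PySem.Int.bxor a (a >>> (5 : Nat)) = PySem.Int.bxor (PySem.Int.truncdiv a 32) a := by
  rw [PySem.Int.bxor_comm]
  have : PySem.Int.truncdiv a 32 = a >>> (5 : Nat) := by
    simp [PySem.Int.truncdiv, Int.shiftRight_eq_div_pow, Int.tdiv_eq_ediv_of_nonneg h]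
  rw [this]

lemma stepB_eq (s : Int) : stepB s = operations s := by
  have hnn : 0 ≤ PySem.Int.mod (PySem.Int.bxor (s * 64) s) 16777216 :=
    PySem.Int.mod_nonneg _ (by norm_num)
  simp only [stepB, operations, bxor_shl6, bxor_shl11, bxor_shr5 _ hnn]

lemma digsS_ne_nil (s : Int) (k : Nat) : digsS s k ≠ [] := by
  cases k <;> simp [digsS]

lemma nopsLoop_spec (l : List Int) : ∀ (s : Int) (d ld : List Int),
    nopsLoop l (s, d, ld, PySem.Int.mod s 10) =
      (finS s l.length, d ++ dlistS s l.length,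
       ld ++ (digsS s l.length).dropLast, PySem.Int.mod (finS s l.length) 10) := by
  induction l with
  | nil => intro s d ld; simp [nopsLoop, finS, dlistS, digsS]
  | cons i rest ih =>
    intro s d ld
    show nopsLoop rest (operations s,
        d ++ [PySem.Int.mod (operations s) 10 - PySem.Int.mod s 10],
        ld ++ [PySem.Int.mod s 10], PySem.Int.mod (operations s) 10) = _
    rw [ih]
    simp only [List.length_cons, finS, dlistS, digsS, List.append_assoc,
      List.dropLast_cons_of_ne_nil (digsS_ne_nil (operations s) rest.length)]
    simp

lemma digsS_last (k : Nat) : ∀ s : Int,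
    (digsS s k).dropLast ++ [PySem.Int.mod (finS s k) 10] = digsS s k := by
  induction k with
  | zero => intro s; simp [digsS, finS]
  | succ k ih =>
    intro s
    show (PySem.Int.mod s 10 :: digsS (operations s) k).dropLast ++
        [PySem.Int.mod (finS (operations s) k) 10] = _
    rw [List.dropLast_cons_of_ne_nil (digsS_ne_nil (operations s) k)]
    simp only [List.cons_append, ih (operations s)]
    rfl

-- splitting the iteration at a midpoint
lemma finS_add (a b : Nat) : ∀ s : Int, finS s (a + b) = finS (finS s a) b := by
  induction a with
  | zero => intro s; simp [finS]
  | succ a ih =>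
    intro s
    rw [Nat.succ_add]
    show finS (operations s) (a + b) = finS (finS (operations s) a) b
    exact ih (operations s)

lemma dlistS_add (a b : Nat) : ∀ s : Int,
    dlistS s (a + b) = dlistS s a ++ dlistS (finS s a) b := by
  induction a with
  | zero => intro s; simp [dlistS, finS]
  | succ a ih =>
    intro s
    rw [Nat.succ_add]
    show (PySem.Int.mod (operations s) 10 - PySem.Int.mod s 10) :: dlistS (operations s) (a + b) = _
    rw [ih (operations s)]
    rfl

lemma digsS_add (a b : Nat) : ∀ s : Int,
    digsS s (a + b) = (digsS s a).dropLast ++ digsS (finS s a) b := by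
  induction a with
  | zero => intro s; simp [digsS, finS]
  | succ a ih =>
    intro s
    rw [Nat.succ_add]
    show PySem.Int.mod s 10 :: digsS (operations s) (a + b) = _
    rw [ih (operations s)]
    show _ = (PySem.Int.mod s 10 :: digsS (operations s) a).dropLast ++ digsS (finS (operations s) a) b
    rw [List.dropLast_cons_of_ne_nil (digsS_ne_nil (operations s) a)]
    rfl

lemma altGo_spec : ∀ (fuel : Nat) (s n : Int), n.toNat ≤ fuel →
    altGo fuel s n = (finS s n.toNat, dlistS s n.toNat, digsS s n.toNat) := by
  intro fuel
  induction fuel with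
  | zero =>
    intro s n h
    have h0 : n.toNat = 0 := by omega
    rw [h0]
    rfl
  | succ f ih =>
    intro s n h
    show (if n ≤ 0 then _ else _) = _
    split_ifs with h0 h1
    · have hz : n.toNat = 0 := by omega
      rw [hz]
      rfl
    · subst h1
      simp only [stepB_eq]
      rfl
    · have h2 : 2 ≤ n := by omega
      have hm : PySem.Int.floordiv n 2 = n / 2 := PySem.Int.floordiv_eq_ediv_of_pos (by omega)
      have ha : (n / 2).toNat ≤ f := by omega
      have hb : (n - n / 2).toNat ≤ f := by omega
      have hab : (n / 2).toNat + (n - n / 2).toNat = n.toNat := by omega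
      dsimp only
      rw [hm, ih s (n / 2) ha]
      dsimp only
      rw [ih (finS s (n / 2).toNat) (n - n / 2) hb]
      dsimp only
      rw [← hab, finS_add, dlistS_add, digsS_add]

-- ===== VERDICT (by name: the statement is the Claim_ definition above) =====
theorem n_operations_spec : Claim_equal_n_operations := by
  intro s n _
  unfold Spec_n_operations n_operations n_operations_alt
  rw [nopsLoop_spec (PySem.List.pyRange 0 n 1) s [] [],
    altGo_spec n.toNat s n (le_refl _)]
  simp only [List.nil_append, PySem.List.length_pyRange_one]
  have : (n - 0).toNat = n.toNat := by omega
  rw [this, digsS_last]
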